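-- pv_equiv track=rewrite | github.com/NUDelta/hit-or-wait | mdp/setup/build_states/triangulation.py | create_segments
-- ===== SOURCE A (Python) =====
-- def create_segments(polygons):
--     result = []
--
--     temp = 0
--     pointers = [0]
--     for poly in polygons:
--         pointers.append(len(poly) + temp)
--         temp += len(poly)
--
--     for i in range(0, len(pointers) - 1) :
--         start = pointers[i]
--         end = pointers[i+1]
--         for j in range(start, end-1):
--             result.append([j, j+1])
--         result.append([end-1, start])
--     return result
-- ===== SOURCE B (Python) =====
-- def create_segments(polygons):
--     # Each polygon is turned into its closed vertex walk (global indices, back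
--     # to the start); consecutive pairs of the walk are the segments.
--     result = []
--     end = 0
--     for poly in polygons:
--         start, end = end, end + len(poly)
--         walk = [*range(start, end - 1), end - 1, start]
--         result += [[a, b] for a, b in zip(walk, walk[1:])]
--     return result
-- ===== Notes on version B (the rewrite author's own statement) =====
-- stated objective: alternative
-- what changed: A precomputes a pointers prefix table and then emits index pairs [j, j+1] arithmetically in an index-driven double loop; B instead materialises each polygon's closed vertex walk (its global indices followed by its start) and pairs consecutive walk elements with a shifted zip, carrying a running offset.
import Mathlib
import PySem

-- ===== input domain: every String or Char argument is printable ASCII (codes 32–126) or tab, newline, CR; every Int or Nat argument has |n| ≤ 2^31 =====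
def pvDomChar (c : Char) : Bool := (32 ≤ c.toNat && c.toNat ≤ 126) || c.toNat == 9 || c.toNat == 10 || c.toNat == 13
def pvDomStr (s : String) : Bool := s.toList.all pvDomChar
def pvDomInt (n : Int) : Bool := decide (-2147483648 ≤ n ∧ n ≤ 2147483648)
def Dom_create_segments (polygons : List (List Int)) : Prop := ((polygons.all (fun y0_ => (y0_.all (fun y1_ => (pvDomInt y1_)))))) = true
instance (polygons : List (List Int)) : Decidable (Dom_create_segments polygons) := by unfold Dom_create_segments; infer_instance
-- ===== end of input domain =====

-- B replaces A's pointer-table plus index-pair arithmetic by one pass that builds each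
-- polygon's closed vertex walk and zips it with its own tail; equal output on all inputs.

-- ===== PORT A =====
def create_segments (polygons : List (List Int)) : List (List Int) :=
  -- first loop: build the pointers table and the running total 'temp'
  let pt := polygons.foldl
    (fun (st : List Int × Int) poly =>
      (st.1 ++ [(poly.length : Int) + st.2], st.2 + (poly.length : Int)))
    ([0], 0)
  let pointers := pt.1
  -- second loop: for i in range(0, len(pointers) - 1)
  (PySem.List.pyRange 0 ((pointers.length : Int) - 1) 1).foldl
    (fun result i =>
      let start := PySem.List.pyGetD pointers i 0
      let e := PySem.List.pyGetD pointers (i + 1) 0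
      let result :=
        (PySem.List.pyRange start (e - 1) 1).foldl
          (fun r j => r ++ [[j, j + 1]]) result
      result ++ [[e - 1, start]])
    []

-- ===== PORT B =====
def create_segments_alt (polygons : List (List Int)) : List (List Int) :=
  (polygons.foldl
    (fun (st : List (List Int) × Int) poly =>
      let start := st.2
      let e := st.2 + (poly.length : Int)
      let walk := PySem.List.pyRange start (e - 1) 1 ++ [e - 1, start]
      (st.1 ++ (walk.zip walk.tail).map (fun p => [p.1, p.2]), e))
    ([], 0)).1

-- ===== PRECONDITION & SPEC =====
def Spec_create_segments (polygons : List (List Int)) (out : List (List Int)) : Prop := out = create_segments_alt polygons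
instance (polygons : List (List Int)) (out : List (List Int)) : Decidable (Spec_create_segments polygons out) := by unfold Spec_create_segments; infer_instance

-- ===== CLAIM (what is proved, stated in full; the proofs are below) =====
def Claim_equal_create_segments : Prop := ∀ (polygons : List (List Int)), Dom_create_segments polygons → Spec_create_segments polygons (create_segments polygons)

-- ===== LEMMAS AND PROOFS =====

-- one polygon's segments, emitted between pointer values a (start) and b (end)
def pvEmit (a b : Int) : List (List Int) :=
  (PySem.List.pyRange a (b - 1) 1).map (fun j => [j, j + 1]) ++ [[b - 1, a]]

-- the pointers A appends (without the leading 0), given running total t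
def pvPtrs (t : Int) : List (List Int) → List Int
  | [] => []
  | p :: ps => ((p.length : Int) + t) :: pvPtrs (t + (p.length : Int)) ps

-- segments emitted for consecutive pairs of a :: q
def pvPairEmit (a : Int) : List Int → List (List Int)
  | [] => []
  | b :: q => pvEmit a b ++ pvPairEmit b q

-- the per-polygon chunks, with a running offset
def pvChunks (t : Int) : List (List Int) → List (List Int)
  | [] => []
  | p :: ps => pvEmit t (t + (p.length : Int)) ++ pvChunks (t + (p.length : Int)) ps

lemma pvPtrs_fold (ps : List (List Int)) : ∀ (pre : List Int) (t : Int),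
    ps.foldl (fun (st : List Int × Int) poly =>
      (st.1 ++ [(poly.length : Int) + st.2], st.2 + (poly.length : Int))) (pre, t)
    = (pre ++ pvPtrs t ps, t + (ps.map (fun p => (p.length : Int))).sum) := by
  induction ps with
  | nil => intro pre t; simp [pvPtrs]
  | cons p ps ih =>
      intro pre t
      simp only [List.foldl_cons, ih, pvPtrs, List.map_cons, List.sum_cons]
      refine Prod.ext ?_ ?_
      · simp
      · simp; ring

-- A's index loop over a pointers list a :: q emits the consecutive-pair segments
lemma pvPairLoop (q : List Int) : ∀ (a : Int) (acc : List (List Int)),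
    (List.range q.length).foldl
      (fun acc (k : Nat) =>
        (acc ++ (PySem.List.pyRange ((a :: q).getD k 0) ((a :: q).getD (k + 1) 0 - 1) 1).map
          (fun j => [j, j + 1]))
        ++ [[(a :: q).getD (k + 1) 0 - 1, (a :: q).getD k 0]]) acc
    = acc ++ pvPairEmit a q := by
  induction q with
  | nil => intro a acc; simp [pvPairEmit]
  | cons b q ih =>
      intro a acc
      rw [List.length_cons, List.range_succ_eq_map, List.foldl_cons, List.foldl_map]
      have h := ih b (acc ++ pvEmit a b)
      simp only [List.getD_cons_zero, List.getD_cons_succ, Nat.succ_eq_add_one] at h ⊢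
      rw [pvPairEmit]
      simpa [pvEmit] using h

-- A's pointer chain emits exactly the per-polygon chunks
lemma pvPairEmit_ptrs (ps : List (List Int)) : ∀ (t : Int),
    pvPairEmit t (pvPtrs t ps) = pvChunks t ps := by
  induction ps with
  | nil => intro t; rfl
  | cons p ps ih =>
      intro t
      rw [pvPtrs, pvPairEmit, pvChunks, add_comm ((p.length : Int)) t, ih]

-- zipping an integer ramp-plus-[x, y] with its tail gives the ramp's unit steps plus (x, y)
lemma pvZcRamp (m : Nat) : ∀ (a x y : Int), x = a + m →
    (((List.range m).map (fun (k : Nat) => a + (k : Int)) ++ [x, y]).zip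
      ((List.range m).map (fun (k : Nat) => a + (k : Int)) ++ [x, y]).tail)
    = (List.range m).map (fun (k : Nat) => (a + (k : Int), a + (k : Int) + 1)) ++ [(x, y)] := by
  induction m with
  | zero => intro a x y h; simp [List.zip]
  | succ m ih =>
      intro a x y h
      rw [List.range_succ_eq_map, List.map_cons, List.map_map, List.map_cons, List.map_map]
      have hf : ((fun (k : Nat) => a + (k : Int)) ∘ Nat.succ) = fun k : Nat => (a + 1) + (k : Int) := by
        funext k; simp only [Function.comp]; push_cast; ring
      have hg : ((fun (k : Nat) => (a + (k : Int), a + (k : Int) + 1)) ∘ Nat.succ)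
          = fun k : Nat => ((a + 1) + (k : Int), (a + 1) + (k : Int) + 1) := by
        funext k; simp only [Function.comp, Prod.mk.injEq]; constructor <;> (push_cast; ring)
      rw [hf, hg]
      have hx : x = (a + 1) + (m : Int) := by rw [h]; push_cast; ring
      have ihm := ih (a + 1) x y hx
      cases m with
      | zero =>
          simp only [List.range_zero, List.map_nil, List.nil_append] at ihm ⊢
          simp [List.zip, hx]
      | succ m' =>
          rw [List.range_succ_eq_map, List.map_cons, List.map_cons] at ihm ⊢
          simp only [List.cons_append, List.tail_cons, List.zip_cons_cons] at ihm ⊢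
          rw [ihm]
          norm_num

-- B's walk chunk for offset t and a polygon of length n equals pvEmit t (t + n)
lemma pvWalkChunk (t : Int) (n : Nat) :
    (((PySem.List.pyRange t (t + (n : Int) - 1) 1 ++ [t + (n : Int) - 1, t]).zip
        (PySem.List.pyRange t (t + (n : Int) - 1) 1 ++ [t + (n : Int) - 1, t]).tail).map
      (fun p => [p.1, p.2]))
    = pvEmit t (t + (n : Int)) := by
  cases n with
  | zero =>
      simp [pvEmit, List.zip]
  | succ m =>
      have hr : (t + ((m + 1 : Nat) : Int) - 1 - t).toNat = m := by push_cast; omega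
      rw [pvEmit, PySem.List.pyRange_one, hr,
        pvZcRamp m t (t + ((m + 1 : Nat) : Int) - 1) t (by push_cast; ring)]
      simp [List.map_map]

-- B's fold accumulates the chunks
lemma pvB_fold (ps : List (List Int)) : ∀ (acc : List (List Int)) (off : Int),
    ps.foldl
      (fun (st : List (List Int) × Int) poly =>
        let start := st.2
        let e := st.2 + (poly.length : Int)
        let walk := PySem.List.pyRange start (e - 1) 1 ++ [e - 1, start]
        (st.1 ++ (walk.zip walk.tail).map (fun p => [p.1, p.2]), e)) (acc, off)
    = (acc ++ pvChunks off ps, off + (ps.map (fun p => (p.length : Int))).sum) := by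
  induction ps with
  | nil => intro acc off; simp [pvChunks]
  | cons p ps ih =>
      intro acc off
      simp only [List.foldl_cons, ih, pvChunks]
      refine Prod.ext ?_ ?_
      · simp [pvWalkChunk off p.length]
      · simp; ring

-- ===== VERDICT (by name: the statement is the Claim_ definition above) =====
theorem create_segments_spec : Claim_equal_create_segments := by
  intro ps _
  show create_segments ps = create_segments_alt ps
  rw [create_segments, create_segments_alt, pvPtrs_fold, pvB_fold]
  simp only [List.singleton_append]
  have hlen : (((0 :: pvPtrs 0 ps).length : Int)) - 1 = (((pvPtrs 0 ps).length : Nat) : Int) := by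
    simp
  rw [hlen, PySem.List.pyRange_one]
  simp only [Int.sub_zero, Int.toNat_natCast, List.foldl_map, zero_add]
  have hstep : ∀ (acc : List (List Int)) (k : Nat),
      (PySem.List.pyRange (PySem.List.pyGetD (0 :: pvPtrs 0 ps) ((k : Int)) 0)
          (PySem.List.pyGetD (0 :: pvPtrs 0 ps) ((k : Int) + 1) 0 - 1) 1).foldl
        (fun r j => r ++ [[j, j + 1]]) acc
      ++ [[PySem.List.pyGetD (0 :: pvPtrs 0 ps) ((k : Int) + 1) 0 - 1,
           PySem.List.pyGetD (0 :: pvPtrs 0 ps) ((k : Int)) 0]]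
      = (acc ++ (PySem.List.pyRange ((0 :: pvPtrs 0 ps).getD k 0)
            ((0 :: pvPtrs 0 ps).getD (k + 1) 0 - 1) 1).map (fun j => [j, j + 1]))
        ++ [[(0 :: pvPtrs 0 ps).getD (k + 1) 0 - 1, (0 :: pvPtrs 0 ps).getD k 0]] := by
    intro acc k
    have h2 : ((k : Int)) + 1 = (((k + 1 : Nat)) : Int) := by push_cast; ring
    rw [h2, PySem.List.pyGetD_natCast, PySem.List.pyGetD_natCast,
      PySem.List.foldl_append_singleton_eq_map]
  refine Eq.trans (PySem.List.foldl_congr_mem (l := List.range (pvPtrs 0 ps).length) (init := []) (h := fun acc k _ => hstep acc k)) ?_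
  rw [pvPairLoop, pvPairEmit_ptrs]
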